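-- pv_equiv track=rewrite | github.com/Tribler/tribler | src/tribler-core/tribler_core/utilities/utilities.py | translate_peers_into_health
-- ===== SOURCE A (Python) =====
-- def translate_peers_into_health(peer_info_dicts):
--     """
--     peer_info_dicts is a peer_info dictionary from Download.create_peerlist_data.
--     purpose : where we want to measure a swarm's health but no tracker can be contacted
--     """
--     upload_only = 0
--     finished = 0
--     unfinished_able_dl = 0
--     interest_in_us = 0
--
--     # collecting some statistics
--     for p_info in peer_info_dicts:
--         upload_only_b = False
--
--         if p_info['upload_only']:
--             upload_only += 1
--             upload_only_b = True
--         if p_info['uinterested']: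
--             interest_in_us += 1
--         if p_info['completed'] == 1:
--             finished += 1
--         else:
--             unfinished_able_dl += 1 if upload_only_b else 0
--
--     # seeders potentials:
--     # 1. it's only want uploading right now (upload only)
--     # 2. it's finished (we don't know whether it want to upload or not)
--     # leecher potentials:
--     # 1. it's interested in our piece
--     # 2. it's unfinished but it's not 'upload only' (it can't leech for some reason)
--     # 3. it's unfinished (less restrictive)
--
--     # make sure to change those description when changing the algorithm
--
--     num_seeders = max(upload_only, finished)
--     num_leech = max(interest_in_us, min(unfinished_able_dl, len(peer_info_dicts) - finished))
--     return num_seeders, num_leech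
-- ===== SOURCE B (Python) =====
-- def translate_peers_into_health(peer_info_dicts):
--     # histogram over the 8 possible (upload_only, uinterested, completed==1) profiles,
--     # then derive all four statistics from the histogram
--     hist = {}
--     for p in peer_info_dicts:
--         key = (bool(p['upload_only']), bool(p['uinterested']), p['completed'] == 1)
--         hist[key] = hist.get(key, 0) + 1
--     n = sum(hist.values())
--     upload_only = sum(c for (u, _, _), c in hist.items() if u)
--     interest_in_us = sum(c for (_, i, _), c in hist.items() if i)
--     finished = sum(c for (_, _, f), c in hist.items() if f)
--     unfinished_able_dl = sum(c for (u, _, f), c in hist.items() if u and not f)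
--     num_seeders = max(upload_only, finished)
--     num_leech = max(interest_in_us, min(unfinished_able_dl, n - finished))
--     return num_seeders, num_leech
-- ===== Notes on version B (the rewrite author's own statement) =====
-- stated objective: alternative
-- what changed: A's single stateful loop with four running counters (and an upload_only_b flag) is replaced by building a histogram (dict) over the 8 possible (upload_only, uinterested, completed) peer profiles and deriving all four statistics afterwards by summing histogram buckets.
import Mathlib
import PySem

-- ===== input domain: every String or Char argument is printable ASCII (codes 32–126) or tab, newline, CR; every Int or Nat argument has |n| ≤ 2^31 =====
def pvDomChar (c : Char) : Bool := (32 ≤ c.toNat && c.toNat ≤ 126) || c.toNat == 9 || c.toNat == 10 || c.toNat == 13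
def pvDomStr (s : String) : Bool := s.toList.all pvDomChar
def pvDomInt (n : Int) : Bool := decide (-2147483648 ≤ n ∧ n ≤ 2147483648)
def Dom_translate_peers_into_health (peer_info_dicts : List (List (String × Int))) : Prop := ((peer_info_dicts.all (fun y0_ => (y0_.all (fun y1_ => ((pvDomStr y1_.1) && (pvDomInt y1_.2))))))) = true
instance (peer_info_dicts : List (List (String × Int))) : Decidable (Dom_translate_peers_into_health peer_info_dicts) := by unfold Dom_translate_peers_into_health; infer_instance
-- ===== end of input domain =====

-- B replaces A's single stateful four-counter loop by a histogram over the 8 possible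
-- (upload_only, uinterested, completed) peer profiles, deriving every statistic from the
-- histogram afterwards; objective: alternative (same O(n) cost, different data structure).

-- p['k'] on an association-list dict: first matching key; 0 is never used under Pre_ (key present).
def pvLookup (p : List (String × Int)) (k : String) : Int :=
  ((p.find? (fun kv => kv.1 == k)).map (·.2)).getD 0

-- ===== PORT A =====
-- the loop body of A, over state (upload_only, finished, unfinished_able_dl, interest_in_us)
def pvStepA (st : Int × Int × Int × Int) (p : List (String × Int)) : Int × Int × Int × Int :=
  let upload_only_b := pvLookup p "upload_only" ≠ 0
  let st1 := if pvLookup p "upload_only" ≠ 0 then (st.1 + 1, st.2.1, st.2.2.1, st.2.2.2) else st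
  let st2 := if pvLookup p "uinterested" ≠ 0 then (st1.1, st1.2.1, st1.2.2.1, st1.2.2.2 + 1) else st1
  if pvLookup p "completed" = 1 then (st2.1, st2.2.1 + 1, st2.2.2.1, st2.2.2.2)
  else (st2.1, st2.2.1, st2.2.2.1 + (if upload_only_b then 1 else 0), st2.2.2.2)

def translate_peers_into_health (peer_info_dicts : List (List (String × Int))) : Int × Int :=
  let st := peer_info_dicts.foldl pvStepA (0, 0, 0, 0)
  let upload_only := st.1
  let finished := st.2.1
  let unfinished_able_dl := st.2.2.1
  let interest_in_us := st.2.2.2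
  (max upload_only finished,
   max interest_in_us (min unfinished_able_dl ((peer_info_dicts.length : Int) - finished)))

-- ===== PORT B =====
-- the (bool(p['upload_only']), bool(p['uinterested']), p['completed'] == 1) profile of a peer
def pvClassify (p : List (String × Int)) : Bool × Bool × Bool :=
  (pvLookup p "upload_only" != 0, pvLookup p "uinterested" != 0, pvLookup p "completed" == 1)

def translate_peers_into_health_alt (peer_info_dicts : List (List (String × Int))) : Int × Int :=
  let hist : PySem.Dict (Bool × Bool × Bool) Int :=
    peer_info_dicts.foldl
      (fun d p => d.insert (pvClassify p) (d.getD (pvClassify p) 0 + 1)) PySem.Dict.empty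
  let n : Int := hist.values.sum
  let upload_only : Int := ((hist.items.filter (fun kv => kv.1.1)).map (·.2)).sum
  let interest_in_us : Int := ((hist.items.filter (fun kv => kv.1.2.1)).map (·.2)).sum
  let finished : Int := ((hist.items.filter (fun kv => kv.1.2.2)).map (·.2)).sum
  let unfinished_able_dl : Int :=
    ((hist.items.filter (fun kv => kv.1.1 && !kv.1.2.2)).map (·.2)).sum
  (max upload_only finished,
   max interest_in_us (min unfinished_able_dl (n - finished)))

-- ===== PRECONDITION & SPEC =====
-- Pre_ excludes dicts missing one of the three keys: there Python A (and B) raises KeyError.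
def Pre_translate_peers_into_health (peer_info_dicts : List (List (String × Int))) : Prop :=
  ∀ p ∈ peer_info_dicts, (p.find? (fun kv => kv.1 == "upload_only")).isSome
    ∧ (p.find? (fun kv => kv.1 == "uinterested")).isSome
    ∧ (p.find? (fun kv => kv.1 == "completed")).isSome
instance (peer_info_dicts : List (List (String × Int))) : Decidable (Pre_translate_peers_into_health peer_info_dicts) := by unfold Pre_translate_peers_into_health; infer_instance

def pvWitness_translate_peers_into_health : (List (List (String × Int))) :=
  [[("upload_only", 1), ("uinterested", 0), ("completed", 1)],
   [("upload_only", 0), ("uinterested", 1), ("completed", 0)]]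

def Spec_translate_peers_into_health (peer_info_dicts : List (List (String × Int))) (out : Int × Int) : Prop := out = translate_peers_into_health_alt peer_info_dicts
instance (peer_info_dicts : List (List (String × Int))) (out : Int × Int) : Decidable (Spec_translate_peers_into_health peer_info_dicts out) := by unfold Spec_translate_peers_into_health; infer_instance

-- ===== CLAIM (what is proved, stated in full; the proofs are below) =====
def Claim_equal_translate_peers_into_health : Prop := ∀ (peer_info_dicts : List (List (String × Int))), Dom_translate_peers_into_health peer_info_dicts → Pre_translate_peers_into_health peer_info_dicts → Spec_translate_peers_into_health peer_info_dicts (translate_peers_into_health peer_info_dicts)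

-- ===== LEMMAS AND PROOFS =====

-- A's fold, started anywhere, adds exactly the four statistics it maintains, componentwise.
theorem pvFoldA_eq_counts (l : List (List (String × Int))) (a b c d : Int) :
    l.foldl pvStepA (a, b, c, d) =
      (a + (l.countP (fun p => pvLookup p "upload_only" ≠ 0) : Int),
       b + (l.countP (fun p => pvLookup p "completed" = 1) : Int),
       c + (l.countP (fun p => pvLookup p "completed" ≠ 1 ∧ pvLookup p "upload_only" ≠ 0) : Int),
       d + (l.countP (fun p => pvLookup p "uinterested" ≠ 0) : Int)) := by
  induction l generalizing a b c d with
  | nil => simp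
  | cons p t ih =>
    simp only [List.foldl_cons, List.countP_cons, pvStepA]
    by_cases hu : pvLookup p "upload_only" ≠ 0 <;>
      by_cases hi : pvLookup p "uinterested" ≠ 0 <;>
      by_cases hc : pvLookup p "completed" = 1 <;>
      simp [hu, hi, hc, ih] <;> omega

-- summing ys-multiplicities over any Nodup key list covering ys and filtered by q is countP q
theorem pvSumCount {K : Type} [DecidableEq K] [BEq K] [LawfulBEq K] (ks ys : List K) (q : K → Bool)
    (hnd : ks.Nodup) (hcov : ∀ y ∈ ys, y ∈ ks) :
    (((ks.filter q).map (fun k => (ys.count k : Int)))).sum = (ys.countP q : Int) := by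
  induction ys with
  | nil => simp
  | cons y t ih =>
    have hy := hcov y (by simp)
    have hcov' : ∀ z ∈ t, z ∈ ks := fun z hz => hcov z (by simp [hz])
    have step : (ks.filter q).map (fun k => (((y :: t).count k : Int)))
        = (ks.filter q).map (fun k => (t.count k : Int) + (if k == y then 1 else 0)) := by
      refine List.map_congr_left (fun k _ => ?_)
      by_cases h : y = k
      · simp [h]
      · have h1 : (y == k) = false := beq_eq_false_iff_ne.mpr h
        have h2 : (k == y) = false := beq_eq_false_iff_ne.mpr (fun e => h e.symm)
        simp [List.count_cons, h1, h2]
    rw [step, List.sum_map_add, ih hcov',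
      PySem.List.sum_map_ite_one_zero (fun k => k == y) (ks.filter q),
      ← List.count_eq_countP]
    by_cases hq : q y = true
    · rw [List.count_eq_one_of_mem (hnd.filter q) (List.mem_filter.2 ⟨hy, hq⟩)]
      simp [hq]
    · rw [List.count_eq_zero.mpr (fun hm => hq (List.mem_filter.1 hm).2)]
      simp [hq]

-- B's per-profile sums over the histogram of map pvClassify l are plain countP's over l
theorem pvHistSum (l : List (List (String × Int))) (q : Bool × Bool × Bool → Bool) :
    ((((l.foldl (fun d p => d.insert (pvClassify p) (d.getD (pvClassify p) 0 + 1))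
          (PySem.Dict.empty : PySem.Dict (Bool × Bool × Bool) Int)).items.filter
            (fun kv => q kv.1)).map (·.2)).sum)
      = (l.countP (fun p => q (pvClassify p)) : Int) := by
  have hfold : l.foldl (fun d p => d.insert (pvClassify p) (d.getD (pvClassify p) 0 + 1))
      (PySem.Dict.empty : PySem.Dict (Bool × Bool × Bool) Int)
      = PySem.Dict.counter (l.map pvClassify) := by
    rw [← PySem.Dict.foldl_insert_getD_add_one_eq_counter, List.foldl_map]
  rw [hfold, PySem.Dict.items_counter, List.filter_map, List.map_map]
  simp only [Function.comp_def]
  rw [pvSumCount _ _ _ (PySem.Set.nodup_ofList _)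
      (fun y hy => (PySem.Set.mem_ofList _ _).2 hy), List.countP_map]
  rfl

-- ===== VERDICT (by name: the statement is the Claim_ definition above) =====
theorem translate_peers_into_health_spec : Claim_equal_translate_peers_into_health := by
  intro l _ _
  show _ = _
  have hU := pvHistSum l (fun k => k.1)
  have hI := pvHistSum l (fun k => k.2.1)
  have hF := pvHistSum l (fun k => k.2.2)
  have hX := pvHistSum l (fun k => k.1 && !k.2.2)
  have hN := pvHistSum l (fun _ => true)
  have eU : l.countP (fun p => (pvClassify p).1)
      = l.countP (fun p => pvLookup p "upload_only" ≠ 0) := by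
    refine List.countP_congr (fun p _ => ?_)
    simp [pvClassify, bne]
  have eI : l.countP (fun p => (pvClassify p).2.1)
      = l.countP (fun p => pvLookup p "uinterested" ≠ 0) := by
    refine List.countP_congr (fun p _ => ?_)
    simp [pvClassify, bne]
  have eF : l.countP (fun p => (pvClassify p).2.2)
      = l.countP (fun p => pvLookup p "completed" = 1) := by
    refine List.countP_congr (fun p _ => ?_)
    simp [pvClassify]
  have eX : l.countP (fun p => (pvClassify p).1 && !(pvClassify p).2.2)
      = l.countP (fun p => pvLookup p "completed" ≠ 1 ∧ pvLookup p "upload_only" ≠ 0) := by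
    refine List.countP_congr (fun p _ => ?_)
    by_cases h1 : pvLookup p "completed" = 1 <;>
      by_cases h2 : pvLookup p "upload_only" = 0 <;> simp [pvClassify, h1, h2]
  have eN : l.countP (fun _ => true) = l.length := by simp
  simp only [translate_peers_into_health, translate_peers_into_health_alt,
    pvFoldA_eq_counts, PySem.Dict.values]
  rw [show ((l.foldl (fun d p => d.insert (pvClassify p) (d.getD (pvClassify p) 0 + 1))
        (PySem.Dict.empty : PySem.Dict (Bool × Bool × Bool) Int)).items.map (·.2))
      = (((l.foldl (fun d p => d.insert (pvClassify p) (d.getD (pvClassify p) 0 + 1))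
        (PySem.Dict.empty : PySem.Dict (Bool × Bool × Bool) Int)).items.filter
          (fun kv => (fun _ => true) kv.1)).map (·.2)) from by rw [List.filter_true]]
  rw [hU, hI, hF, hX, hN, eU, eI, eF, eX, eN]
  simp
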